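-- pv_equiv track=rewrite | github.com/eliottcassidy2000/math | 04-computation/vitali_i2_formula_n8.py | count_disjoint_pairs
-- ===== SOURCE A (Python) =====
-- def count_disjoint_pairs(cycles):
--     """Count pairs of directed cycles with disjoint vertex sets."""
--     vsets = [frozenset(c) for c in cycles]
--     count = 0
--     for i in range(len(vsets)):
--         for j in range(i+1, len(vsets)):
--             if len(vsets[i] & vsets[j]) == 0:
--                 count += 1
--     return count
-- ===== SOURCE B (Python) =====
-- def count_disjoint_pairs(cycles):
--     """Count pairs of directed cycles with disjoint vertex sets."""
--     n = len(cycles)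
--     index = {}   # vertex -> set of indices of earlier cycles containing it
--     inter = 0
--     for j, c in enumerate(cycles):
--         vs = list(dict.fromkeys(c))
--         hit = set()
--         for v in vs:
--             hit |= index.get(v, set())
--         inter += len(hit)
--         for v in vs:
--             index.setdefault(v, set()).add(j)
--     return n * (n - 1) // 2 - inter
-- ===== Notes on version B (the rewrite author's own statement) =====
-- stated objective: faster
-- what changed: Replaces A's nested all-pairs loop with pairwise frozenset intersections by a single pass that maintains an inverted index (vertex -> set of earlier cycle indices), sums the number of earlier intersecting cycles per cycle, and returns n*(n-1)//2 minus that total.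
import Mathlib
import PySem

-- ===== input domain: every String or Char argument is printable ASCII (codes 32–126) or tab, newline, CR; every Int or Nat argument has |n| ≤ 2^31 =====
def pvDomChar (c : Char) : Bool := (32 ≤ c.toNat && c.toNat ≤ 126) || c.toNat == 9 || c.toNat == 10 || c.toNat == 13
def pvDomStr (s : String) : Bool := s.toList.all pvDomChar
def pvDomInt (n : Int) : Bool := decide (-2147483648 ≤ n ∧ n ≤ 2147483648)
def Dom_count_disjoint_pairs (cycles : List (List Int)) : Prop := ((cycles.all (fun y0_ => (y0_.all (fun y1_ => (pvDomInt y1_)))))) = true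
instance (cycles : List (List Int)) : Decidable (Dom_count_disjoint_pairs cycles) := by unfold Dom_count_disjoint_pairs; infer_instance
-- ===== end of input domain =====

-- B replaces A's quadratic all-pairs set-intersection scan by a one-pass inverted index
-- (vertex -> indices of earlier cycles), counting intersecting pairs and subtracting from n*(n-1)//2.


-- ===== PORT A =====
-- vsets = [frozenset(c) for c in cycles]; nested loops over range(len), count pairs with empty intersection
def count_disjoint_pairs (cycles : List (List Int)) : Int :=
  let vsets := cycles.map (fun c => PySem.Set.ofList c)
  (PySem.List.pyRange 0 (vsets.length : Int)).foldl (fun count i =>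
    (PySem.List.pyRange (i + 1) (vsets.length : Int)).foldl (fun count j =>
      if PySem.Set.len (PySem.Set.inter (PySem.List.pyGetD vsets i []) (PySem.List.pyGetD vsets j [])) = 0
      then count + 1 else count) count) 0

-- ===== PORT B =====
-- one step of B's main loop: j = index of the cycle, c = the cycle;
-- hit = union of index[v] over the (deduplicated) vertices of c; then each vertex records j
def bStep (st : PySem.Dict Int (PySem.Set Int) × Int) (p : Int × List Int) :
    PySem.Dict Int (PySem.Set Int) × Int :=
  let vs := PySem.List.dedup p.2
  let hit := vs.foldl (fun h v => PySem.Set.union h (st.1.getD v PySem.Set.empty)) PySem.Set.empty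
  let idx := vs.foldl (fun d v => d.insert v (PySem.Set.add (d.getD v PySem.Set.empty) p.1)) st.1
  (idx, st.2 + PySem.Set.len hit)

def count_disjoint_pairs_alt (cycles : List (List Int)) : Int :=
  let n : Int := cycles.length
  let st := (PySem.List.enumerate cycles).foldl bStep (PySem.Dict.empty, 0)
  PySem.Int.floordiv (n * (n - 1)) 2 - st.2

-- ===== PRECONDITION & SPEC =====
def Spec_count_disjoint_pairs (cycles : List (List Int)) (out : Int) : Prop := out = count_disjoint_pairs_alt cycles
instance (cycles : List (List Int)) (out : Int) : Decidable (Spec_count_disjoint_pairs cycles out) := by unfold Spec_count_disjoint_pairs; infer_instance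

-- ===== CLAIM (what is proved, stated in full; the proofs are below) =====
def Claim_equal_count_disjoint_pairs : Prop := ∀ (cycles : List (List Int)), Dom_count_disjoint_pairs cycles → Spec_count_disjoint_pairs cycles (count_disjoint_pairs cycles)

-- ===== LEMMAS AND PROOFS =====

-- "cycle a is vertex-disjoint from cycle c"
abbrev pvDisj (a c : List Int) : Prop := ∀ v ∈ a, v ∉ c

-- A's test "len(vsets[i] & vsets[j]) == 0" is disjointness of the underlying lists
theorem pv_inter_len_zero (a c : List Int) :
    PySem.Set.len (PySem.Set.inter (PySem.Set.ofList a) (PySem.Set.ofList c)) = 0 ↔ pvDisj a c := by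
  rw [PySem.Set.len_eq]
  constructor
  · intro h v hv hvc
    have hlen : (PySem.Set.inter (PySem.Set.ofList a) (PySem.Set.ofList c)).length = 0 := by
      exact_mod_cast h
    have : PySem.Set.inter (PySem.Set.ofList a) (PySem.Set.ofList c) = [] :=
      List.length_eq_zero_iff.mp hlen
    have hmem : v ∈ PySem.Set.inter (PySem.Set.ofList a) (PySem.Set.ofList c) := by
      rw [PySem.Set.mem_inter]
      exact ⟨(PySem.Set.mem_ofList a v).2 hv, (PySem.Set.mem_ofList c v).2 hvc⟩
    rw [this] at hmem; exact (List.not_mem_nil).elim hmem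
  · intro h
    have : PySem.Set.inter (PySem.Set.ofList a) (PySem.Set.ofList c) = [] := by
      rw [List.eq_nil_iff_forall_not_mem]
      intro v hv
      rw [PySem.Set.mem_inter, PySem.Set.mem_ofList, PySem.Set.mem_ofList] at hv
      exact h v hv.1 hv.2
    rw [this]; rfl

-- number of cycles among xs that MEET c / that are DISJOINT from c
def pvHits (xs : List (List Int)) (c : List Int) : Nat :=
  (List.range xs.length).countP (fun k => decide (¬ pvDisj (xs.getD k []) c))
def pvFree (xs : List (List Int)) (c : List Int) : Nat :=
  (List.range xs.length).countP (fun k => decide (pvDisj (xs.getD k []) c))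

theorem pvHits_add_pvFree (xs : List (List Int)) (c : List Int) :
    pvFree xs c + pvHits xs c = xs.length := by
  unfold pvHits pvFree
  have h := List.length_eq_countP_add_countP (l := List.range xs.length)
    (fun k => decide (pvDisj (xs.getD k []) c))
  simp only [List.length_range] at h
  simpa using h.symm

-- ---------- A side ----------

theorem pvGetD_map_append (xs : List (List Int)) (c : List Int) (k : Nat) (hk : k < xs.length) :
    PySem.List.pyGetD ((xs ++ [c]).map (fun c => PySem.Set.ofList c)) (k : Int) [] =
      PySem.List.pyGetD (xs.map (fun c => PySem.Set.ofList c)) (k : Int) [] := by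
  rw [PySem.List.pyGetD_natCast, PySem.List.pyGetD_natCast, List.map_append]
  exact List.getD_append _ _ _ _ (by simpa using hk)

theorem pvGetD_map_last (xs : List (List Int)) (c : List Int) :
    PySem.List.pyGetD ((xs ++ [c]).map (fun c => PySem.Set.ofList c)) (xs.length : Int) [] =
      PySem.Set.ofList c := by
  rw [PySem.List.pyGetD_natCast, List.map_append]
  have : (xs.map (fun c => PySem.Set.ofList c)).length = xs.length := by simp
  rw [List.getD_eq_getElem?_getD, List.getElem?_append_right (by simp)]
  simp

theorem pvGetD_map_at (xs : List (List Int)) (k : Nat) (hk : k < xs.length) :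
    PySem.List.pyGetD (xs.map (fun c => PySem.Set.ofList c)) (k : Int) [] =
      PySem.Set.ofList (xs.getD k []) := by
  rw [PySem.List.pyGetD_natCast]
  rw [List.getD_eq_getElem?_getD, List.getD_eq_getElem?_getD, List.getElem?_map]
  rw [List.getElem?_eq_getElem hk]
  simp

-- closed form for A: sum over i of the inner count
def pvASum (xs : List (List Int)) : Int :=
  ((PySem.List.pyRange 0 (xs.length : Int)).map (fun i =>
    ((PySem.List.pyRange (i + 1) (xs.length : Int)).countP (fun j =>
      decide (PySem.Set.len (PySem.Set.inter
        (PySem.List.pyGetD (xs.map (fun c => PySem.Set.ofList c)) i [])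
        (PySem.List.pyGetD (xs.map (fun c => PySem.Set.ofList c)) j [])) = 0)) : Int))).sum

theorem pvA_closed (xs : List (List Int)) : count_disjoint_pairs xs = pvASum xs := by
  unfold count_disjoint_pairs pvASum
  simp only [List.length_map]
  rw [PySem.List.foldl_congr_mem (g := fun count i => count +
    ((PySem.List.pyRange (i + 1) (xs.length : Int)).countP (fun j =>
      decide (PySem.Set.len (PySem.Set.inter
        (PySem.List.pyGetD (xs.map (fun c => PySem.Set.ofList c)) i [])
        (PySem.List.pyGetD (xs.map (fun c => PySem.Set.ofList c)) j [])) = 0)) : Int))]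
  · rw [PySem.List.foldl_add]; simp
  · intro acc i _
    exact PySem.List.foldl_ite_add_one _ _ _

theorem pvASum_snoc (xs : List (List Int)) (c : List Int) :
    pvASum (xs ++ [c]) = pvASum xs + (pvFree xs c : Int) := by
  unfold pvASum
  have hlen : (((xs ++ [c]).length : Nat) : Int) = (xs.length : Int) + 1 := by simp
  rw [hlen]
  rw [PySem.List.pyRange_one_succ_right (Int.natCast_nonneg xs.length)]
  rw [List.map_append, List.sum_append]
  have hnil : PySem.List.pyRange ((xs.length : Int) + 1) ((xs.length : Int) + 1) = [] := by
    simp [pysem]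
  rw [PySem.List.pyRange_zero_natCast, List.map_map, List.map_map]
  have helt : ∀ k ∈ List.range xs.length,
      (((PySem.List.pyRange ((k : Int) + 1) ((xs.length : Int) + 1)).countP (fun j =>
        decide (PySem.Set.len (PySem.Set.inter
          (PySem.List.pyGetD ((xs ++ [c]).map (fun c => PySem.Set.ofList c)) (k : Int) [])
          (PySem.List.pyGetD ((xs ++ [c]).map (fun c => PySem.Set.ofList c)) j [])) = 0))) : Int)
      = (((PySem.List.pyRange ((k : Int) + 1) ((xs.length : Int))).countP (fun j =>
        decide (PySem.Set.len (PySem.Set.inter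
          (PySem.List.pyGetD (xs.map (fun c => PySem.Set.ofList c)) (k : Int) [])
          (PySem.List.pyGetD (xs.map (fun c => PySem.Set.ofList c)) j [])) = 0))) : Int)
        + (if pvDisj (xs.getD k []) c then 1 else 0) := by
    intro k hk
    rw [List.mem_range] at hk
    have hle : (k : Int) + 1 ≤ (xs.length : Int) := by omega
    rw [PySem.List.pyRange_one_succ_right hle, List.countP_append]
    have hcongr : List.countP (fun j =>
        decide (PySem.Set.len (PySem.Set.inter
          (PySem.List.pyGetD ((xs ++ [c]).map (fun c => PySem.Set.ofList c)) (k : Int) [])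
          (PySem.List.pyGetD ((xs ++ [c]).map (fun c => PySem.Set.ofList c)) j [])) = 0))
        (PySem.List.pyRange ((k : Int) + 1) (xs.length : Int))
        = List.countP (fun j =>
        decide (PySem.Set.len (PySem.Set.inter
          (PySem.List.pyGetD (xs.map (fun c => PySem.Set.ofList c)) (k : Int) [])
          (PySem.List.pyGetD (xs.map (fun c => PySem.Set.ofList c)) j [])) = 0))
        (PySem.List.pyRange ((k : Int) + 1) (xs.length : Int)) := by
      apply List.countP_congr
      intro j hj
      rw [PySem.List.mem_pyRange_one] at hj
      obtain ⟨m, rfl, hm⟩ : ∃ m : Nat, j = (m : Int) ∧ m < xs.length := by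
        refine ⟨j.toNat, ?_, ?_⟩ <;> omega
      rw [pvGetD_map_append _ _ _ hk, pvGetD_map_append _ _ _ hm]
    rw [hcongr]
    have hsingle : List.countP (fun j =>
        decide (PySem.Set.len (PySem.Set.inter
          (PySem.List.pyGetD ((xs ++ [c]).map (fun c => PySem.Set.ofList c)) (k : Int) [])
          (PySem.List.pyGetD ((xs ++ [c]).map (fun c => PySem.Set.ofList c)) j [])) = 0))
        [(xs.length : Int)]
        = if pvDisj (xs.getD k []) c then 1 else 0 := by
      rw [List.countP_cons, List.countP_nil]
      rw [pvGetD_map_append _ _ _ hk, pvGetD_map_last, pvGetD_map_at _ _ hk]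
      by_cases h : pvDisj (xs.getD k []) c
      · rw [decide_eq_true ((pv_inter_len_zero _ _).2 h), if_pos h]
        norm_num
      · rw [decide_eq_false (fun hz => h ((pv_inter_len_zero _ _).1 hz)), if_neg h]
        norm_num
    rw [hsingle]
    push_cast
    ring
  simp only [Function.comp_def]
  rw [List.map_congr_left helt]
  have hsplit := PySem.List.sum_map_add_int (List.range xs.length)
    (fun k => (((PySem.List.pyRange ((k : Int) + 1) ((xs.length : Int))).countP (fun j =>
        decide (PySem.Set.len (PySem.Set.inter
          (PySem.List.pyGetD (xs.map (fun c => PySem.Set.ofList c)) (k : Int) [])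
          (PySem.List.pyGetD (xs.map (fun c => PySem.Set.ofList c)) j [])) = 0))) : Int))
    (fun k => if pvDisj (xs.getD k []) c then (1 : Int) else 0)
  rw [hsplit]
  have hfree : (List.map (fun k => if pvDisj (xs.getD k []) c then (1 : Int) else 0)
      (List.range xs.length)).sum = (pvFree xs c : Int) := by
    have := PySem.List.sum_map_ite_one_zero
      (fun k => decide (pvDisj (xs.getD k []) c)) (List.range xs.length)
    simpa using this
  rw [hfree]
  simp [hnil]

theorem pvA_snoc (xs : List (List Int)) (c : List Int) :
    count_disjoint_pairs (xs ++ [c]) = count_disjoint_pairs xs + (pvFree xs c : Int) := by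
  rw [pvA_closed, pvA_closed, pvASum_snoc]

-- ---------- B side ----------

theorem pv_enumerate_snoc (xs : List (List Int)) (c : List Int) (s : Int) :
    PySem.List.enumerate (xs ++ [c]) s = PySem.List.enumerate xs s ++ [(s + xs.length, c)] := by
  induction xs generalizing s with
  | nil => simp [PySem.List.enumerate]
  | cons h t ih => simp [PySem.List.enumerate, ih]; ring_nf

def pvIdxAfter (xs : List (List Int)) : PySem.Dict Int (PySem.Set Int) :=
  ((PySem.List.enumerate xs).foldl bStep (PySem.Dict.empty, 0)).1
def pvInterAfter (xs : List (List Int)) : Int :=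
  ((PySem.List.enumerate xs).foldl bStep (PySem.Dict.empty, 0)).2

-- the dict invariant: index[v] is a nodup list whose members are exactly the indices
-- (as Ints) of the cycles of xs containing v
def pvIdxInv (xs : List (List Int)) (d : PySem.Dict Int (PySem.Set Int)) : Prop :=
  (∀ v : Int, (d.getD v PySem.Set.empty).Nodup) ∧
  (∀ v j : Int, j ∈ d.getD v PySem.Set.empty ↔
    ∃ k : Nat, k < xs.length ∧ j = (k : Int) ∧ v ∈ xs.getD k [])

theorem pv_getD_foldl_insert_add (vs : List Int) (hnd : vs.Nodup)
    (d : PySem.Dict Int (PySem.Set Int)) (n : Int) (w : Int) :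
    ((vs.foldl (fun d v => d.insert v (PySem.Set.add (d.getD v PySem.Set.empty) n)) d).getD w PySem.Set.empty)
      = if w ∈ vs then PySem.Set.add (d.getD w PySem.Set.empty) n else d.getD w PySem.Set.empty := by
  induction vs generalizing d with
  | nil => simp
  | cons v vs ih =>
    have hnd' : vs.Nodup := hnd.of_cons
    have hv : v ∉ vs := by
      have := List.nodup_cons.mp hnd; exact this.1
    rw [List.foldl_cons, ih hnd']
    by_cases hw : w ∈ vs
    · have hwv : w ≠ v := fun h => hv (h ▸ hw)
      simp only [hw, if_true, List.mem_cons, hwv, false_or]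
      rw [PySem.Dict.getD_insert_of_ne _ _ _ hwv]
    · by_cases hwv : w = v
      · subst hwv
        simp only [hw, if_false, List.mem_cons, true_or, if_true]
        rw [PySem.Dict.getD_insert_self]
      · simp only [hw, if_false, List.mem_cons, hwv, false_or]
        rw [PySem.Dict.getD_insert_of_ne _ _ _ hwv]

theorem pv_mem_foldl_union (vs : List Int) (g : Int → PySem.Set Int) (h0 : PySem.Set Int) (j : Int) :
    j ∈ vs.foldl (fun h v => PySem.Set.union h (g v)) h0 ↔ j ∈ h0 ∨ ∃ v ∈ vs, j ∈ g v := by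
  induction vs generalizing h0 with
  | nil => simp
  | cons v vs ih =>
    rw [List.foldl_cons, ih]
    rw [PySem.Set.mem_union]
    constructor
    · rintro ((h | h) | ⟨w, hw, hj⟩)
      · exact Or.inl h
      · exact Or.inr ⟨v, List.mem_cons_self, h⟩
      · exact Or.inr ⟨w, List.mem_cons_of_mem _ hw, hj⟩
    · rintro (h | ⟨w, hw, hj⟩)
      · exact Or.inl (Or.inl h)
      · rcases List.mem_cons.mp hw with rfl | hw
        · exact Or.inl (Or.inr hj)
        · exact Or.inr ⟨w, hw, hj⟩

theorem pv_nodup_foldl_union (vs : List Int) (g : Int → PySem.Set Int) (h0 : PySem.Set Int)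
    (h : h0.Nodup) : (vs.foldl (fun h v => PySem.Set.union h (g v)) h0).Nodup := by
  induction vs generalizing h0 with
  | nil => exact h
  | cons v vs ih => exact ih _ (PySem.Set.nodup_union _ _ h)

theorem pv_getD_snoc_lt (xs : List (List Int)) (c : List Int) (k : Nat) (hk : k < xs.length) :
    (xs ++ [c]).getD k [] = xs.getD k [] :=
  List.getD_append _ _ _ _ hk

theorem pv_getD_snoc_last (xs : List (List Int)) (c : List Int) :
    (xs ++ [c]).getD xs.length [] = c := by
  rw [List.getD_eq_getElem?_getD, List.getElem?_append_right (le_refl _)]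
  simp

theorem pv_idxAfter_snoc (xs : List (List Int)) (c : List Int) :
    pvIdxAfter (xs ++ [c]) =
      (PySem.List.dedup c).foldl
        (fun d v => d.insert v (PySem.Set.add (d.getD v PySem.Set.empty) (xs.length : Int)))
        (pvIdxAfter xs) := by
  unfold pvIdxAfter
  rw [pv_enumerate_snoc, List.foldl_append]
  simp [bStep]

theorem pv_interAfter_snoc (xs : List (List Int)) (c : List Int) :
    pvInterAfter (xs ++ [c]) = pvInterAfter xs +
      PySem.Set.len ((PySem.List.dedup c).foldl
        (fun h v => PySem.Set.union h ((pvIdxAfter xs).getD v PySem.Set.empty))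
        PySem.Set.empty) := by
  unfold pvInterAfter pvIdxAfter
  rw [pv_enumerate_snoc, List.foldl_append]
  simp [bStep]

theorem pv_idx_inv (xs : List (List Int)) : pvIdxInv xs (pvIdxAfter xs) := by
  induction xs using List.reverseRecOn with
  | nil =>
    constructor
    · intro v; simp [pvIdxAfter, PySem.List.enumerate, PySem.Dict.getD_empty, PySem.Set.empty]
    · intro v j; simp [pvIdxAfter, PySem.List.enumerate, PySem.Dict.getD_empty, PySem.Set.empty]
  | append_singleton xs c ih =>
    obtain ⟨ihn, ihm⟩ := ih
    rw [pv_idxAfter_snoc]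
    constructor
    · intro v
      rw [pv_getD_foldl_insert_add _ (PySem.List.nodup_dedup c)]
      split_ifs with h
      · exact PySem.Set.nodup_add _ _ (ihn v)
      · exact ihn v
    · intro v j
      rw [pv_getD_foldl_insert_add _ (PySem.List.nodup_dedup c)]
      have hlen : (xs ++ [c]).length = xs.length + 1 := by simp
      split_ifs with h
      · rw [PySem.List.mem_dedup] at h
        rw [PySem.Set.mem_add, ihm v j]
        constructor
        · rintro (⟨k, hk, rfl, hv⟩ | rfl)
          · exact ⟨k, by omega, rfl, by rw [pv_getD_snoc_lt _ _ _ hk]; exact hv⟩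
          · exact ⟨xs.length, by omega, rfl, by rw [pv_getD_snoc_last]; exact h⟩
        · rintro ⟨k, hk, rfl, hv⟩
          rw [hlen] at hk
          rcases Nat.lt_succ_iff_lt_or_eq.mp hk with hk' | rfl
          · exact Or.inl ⟨k, hk', rfl, by rwa [pv_getD_snoc_lt _ _ _ hk'] at hv⟩
          · exact Or.inr rfl
      · rw [PySem.List.mem_dedup] at h
        rw [ihm v j]
        constructor
        · rintro ⟨k, hk, rfl, hv⟩
          exact ⟨k, by omega, rfl, by rw [pv_getD_snoc_lt _ _ _ hk]; exact hv⟩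
        · rintro ⟨k, hk, rfl, hv⟩
          rw [hlen] at hk
          rcases Nat.lt_succ_iff_lt_or_eq.mp hk with hk' | rfl
          · exact ⟨k, hk', rfl, by rwa [pv_getD_snoc_lt _ _ _ hk'] at hv⟩
          · rw [pv_getD_snoc_last] at hv; exact absurd hv h

theorem pv_length_eq_countP (l : List Int) (hnd : l.Nodup) (n : Nat) (P : Nat → Prop)
    [DecidablePred P] (h : ∀ j, j ∈ l ↔ ∃ k : Nat, k < n ∧ j = (k : Int) ∧ P k) :
    l.length = (List.range n).countP (fun k => decide (P k)) := by
  have hperm : l.Perm (List.map (fun k : Nat => (k : Int)) ((List.range n).filter (fun k => decide (P k)))) := by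
    apply List.perm_of_nodup_nodup_toFinset_eq hnd
    · exact (List.Nodup.filter _ (List.nodup_range)).map (fun a b => by exact_mod_cast id)
    · ext j
      simp only [List.mem_toFinset, h, List.mem_map, List.mem_filter, List.mem_range,
        decide_eq_true_eq]
      constructor
      · rintro ⟨k, hk, rfl, hP⟩; exact ⟨k, ⟨hk, hP⟩, rfl⟩
      · rintro ⟨k, ⟨hk, hP⟩, rfl⟩; exact ⟨k, hk, rfl, hP⟩
  rw [hperm.length_eq, List.length_map, ← List.countP_eq_length_filter]

theorem pv_inter_snoc (xs : List (List Int)) (c : List Int) :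
    pvInterAfter (xs ++ [c]) = pvInterAfter xs + (pvHits xs c : Int) := by
  rw [pv_interAfter_snoc]
  congr 1
  obtain ⟨ihn, ihm⟩ := pv_idx_inv xs
  simp only [PySem.Set.empty] at ihn ihm
  set hit := (PySem.List.dedup c).foldl
    (fun h v => PySem.Set.union h ((pvIdxAfter xs).getD v PySem.Set.empty))
    PySem.Set.empty with hhit
  have hnd : hit.Nodup := pv_nodup_foldl_union _ _ _ (by simp [PySem.Set.empty])
  have hmem : ∀ j, j ∈ hit ↔
      ∃ k : Nat, k < xs.length ∧ j = (k : Int) ∧ ¬ pvDisj (xs.getD k []) c := by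
    intro j
    rw [hhit, pv_mem_foldl_union]
    simp only [PySem.Set.empty, List.not_mem_nil, false_or, PySem.List.mem_dedup]
    constructor
    · rintro ⟨v, hvc, hj⟩
      rw [ihm v j] at hj
      obtain ⟨k, hk, rfl, hv⟩ := hj
      exact ⟨k, hk, rfl, fun hd => hd v hv hvc⟩
    · rintro ⟨k, hk, rfl, hd⟩
      rw [pvDisj] at hd
      push Not at hd
      obtain ⟨v, hv, hvc⟩ := hd
      exact ⟨v, hvc, (ihm v k).2 ⟨k, hk, rfl, hv⟩⟩
  rw [PySem.Set.len_eq, pv_length_eq_countP hit hnd xs.length _ hmem]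
  rfl

-- ---------- combination ----------

theorem pv_main (xs : List (List Int)) :
    2 * (count_disjoint_pairs xs + pvInterAfter xs) = (xs.length : Int) * ((xs.length : Int) - 1) := by
  induction xs using List.reverseRecOn with
  | nil =>
    simp [count_disjoint_pairs, pvInterAfter, PySem.List.enumerate]
  | append_singleton xs c ih =>
    rw [pvA_snoc, pv_inter_snoc]
    have hn := pvHits_add_pvFree xs c
    have hlen : ((xs ++ [c]).length : Int) = (xs.length : Int) + 1 := by simp
    rw [hlen]
    have : (pvFree xs c : Int) + (pvHits xs c : Int) = (xs.length : Int) := by exact_mod_cast hn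
    nlinarith [ih, this]

-- ===== VERDICT (by name: the statement is the Claim_ definition above) =====
theorem count_disjoint_pairs_spec : Claim_equal_count_disjoint_pairs := by
  intro cycles _
  unfold Spec_count_disjoint_pairs count_disjoint_pairs_alt
  have h := pv_main cycles
  have h2 : PySem.Int.floordiv ((cycles.length : Int) * ((cycles.length : Int) - 1)) 2
      = count_disjoint_pairs cycles + pvInterAfter cycles := by
    rw [PySem.Int.floordiv_eq_ediv_of_pos (by norm_num), ← h]
    omega
  simp only []
  rw [h2]
  unfold pvInterAfter
  ring
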